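-- pv_equiv track=rewrite | github.com/thiagopelizoni/ProjectEuler | src/problem_479.py | compute_sum_chunk
-- ===== SOURCE A (Python) =====
-- def compute_sum_chunk(start, end, n, MOD):
--     s = 0
--     for k in range(start, end + 1):
--         r = 1 - k * k
--         r_mod = r % MOD
--         rn = pow(r_mod, n, MOD)
--         one_minus_rn = (1 - rn) % MOD
--         num = (r_mod * one_minus_rn) % MOD
--         den = (k * k) % MOD
--         den_inv = pow(den, MOD - 2, MOD) if den != 0 else 0
--         contrib = (num * den_inv) % MOD
--         s = (s + contrib) % MOD
--     return s
-- ===== SOURCE B (Python) =====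
-- def compute_sum_chunk(start, end, n, MOD):
--     if start > end:
--         return 0
--     if start == end:
--         k = start
--         den = k * k % MOD
--         if den == 0:
--             return 0
--         r = (1 - k * k) % MOD
--         inv_k = pow(k, MOD - 2, MOD)
--         return r * ((1 - pow(r, n, MOD)) % MOD) % MOD * (inv_k * inv_k % MOD) % MOD
--     mid = (start + end) // 2
--     return (compute_sum_chunk(start, mid, n, MOD)
--             + compute_sum_chunk(mid + 1, end, n, MOD)) % MOD
-- ===== Notes on version B (the rewrite author's own statement) =====
-- stated objective: alternative
-- what changed: B replaces A's linear fold by a divide-and-conquer recursion that splits the range at the midpoint and combines the two half-sums mod MOD, and in the leaf it inverts k once with pow(k, MOD-2, MOD) and squares that, instead of A's pow(k*k % MOD, MOD-2, MOD).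
-- outside the precondition, e.g. on compute_sum_chunk(2, 2, -1, 5): A returns 4, B returns 4; on compute_sum_chunk(1, 1, -1, 5): A raises ValueError, B raises ValueError; on compute_sum_chunk(1, 2, 3, 0): A raises ZeroDivisionError, B raises ZeroDivisionError
import Mathlib
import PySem

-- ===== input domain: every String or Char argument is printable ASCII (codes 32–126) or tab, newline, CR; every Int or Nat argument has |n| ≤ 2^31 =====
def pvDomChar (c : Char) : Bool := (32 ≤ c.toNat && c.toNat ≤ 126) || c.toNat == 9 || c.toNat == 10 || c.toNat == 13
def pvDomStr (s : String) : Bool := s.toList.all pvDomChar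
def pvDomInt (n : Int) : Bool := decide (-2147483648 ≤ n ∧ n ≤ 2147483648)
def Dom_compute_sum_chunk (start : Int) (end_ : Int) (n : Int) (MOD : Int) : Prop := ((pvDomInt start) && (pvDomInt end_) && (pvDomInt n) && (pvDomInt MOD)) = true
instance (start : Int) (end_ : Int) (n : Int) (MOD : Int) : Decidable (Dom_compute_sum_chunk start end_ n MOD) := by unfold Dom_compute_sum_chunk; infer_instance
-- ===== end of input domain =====

-- B replaces A's linear fold by a midpoint divide-and-conquer recursion and, in the leaf,
-- inverts k once with pow(k, MOD-2, MOD) and squares it instead of inverting k*k (objective: alternative).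

-- Shared helper: hand port of Python's three-argument pow(b, e, m) for e >= 0 —
-- binary exponentiation reducing mod m at every step; it returns (b^e) mod m with
-- Python's sign-of-the-divisor mod (exact on the admitted inputs, where 0 < m).
def pvPowMod (b : Int) (e : Nat) (m : Int) : Int :=
  if _h : e = 0 then PySem.Int.mod 1 m
  else
    let hh := pvPowMod (PySem.Int.mod (b * b) m) (e / 2) m
    if e % 2 = 1 then PySem.Int.mod (hh * b) m else hh
termination_by e
decreasing_by exact Nat.div_lt_self (by omega) one_lt_two

-- ===== PORT A =====
def compute_sum_chunk (start : Int) (end_ : Int) (n : Int) (MOD : Int) : Int :=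
  (PySem.List.pyRange start (end_ + 1) 1).foldl (fun s k =>
    let r := 1 - k * k
    let r_mod := PySem.Int.mod r MOD
    let rn := pvPowMod r_mod n.toNat MOD
    let one_minus_rn := PySem.Int.mod (1 - rn) MOD
    let num := PySem.Int.mod (r_mod * one_minus_rn) MOD
    let den := PySem.Int.mod (k * k) MOD
    let den_inv := if den ≠ 0 then pvPowMod den (MOD - 2).toNat MOD else 0
    let contrib := PySem.Int.mod (num * den_inv) MOD
    PySem.Int.mod (s + contrib) MOD) 0

-- ===== PORT B =====
def compute_sum_chunk_alt (start : Int) (end_ : Int) (n : Int) (MOD : Int) : Int :=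
  if _hgt : end_ < start then 0
  else if _heq : start = end_ then
    let k := start
    let den := PySem.Int.mod (k * k) MOD
    if den = 0 then 0
    else
      let r := PySem.Int.mod (1 - k * k) MOD
      let inv_k := pvPowMod k (MOD - 2).toNat MOD
      PySem.Int.mod
        (PySem.Int.mod (r * PySem.Int.mod (1 - pvPowMod r n.toNat MOD) MOD) MOD *
          PySem.Int.mod (inv_k * inv_k) MOD) MOD
  else
    let mid := PySem.Int.floordiv (start + end_) 2
    PySem.Int.mod
      (compute_sum_chunk_alt start mid n MOD + compute_sum_chunk_alt (mid + 1) end_ n MOD) MOD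
termination_by (end_ - start).toNat
decreasing_by
  all_goals
    have hlt : start < end_ := by omega
    have hb := PySem.Int.floordiv_two_mid_bounds (le_of_lt hlt)
    have hu : PySem.Int.floordiv (start + end_) 2 < end_ :=
      (PySem.Int.floordiv_lt_iff_lt_mul (by norm_num)).mpr (by omega)
    omega

-- ===== PRECONDITION & SPEC =====
-- Pre_ excludes nonempty ranges with MOD < 1 or n < 0: there Python pow's negative
-- exponent (n, or MOD-2 with a negative modulus) raises ValueError for any base not
-- coprime to MOD — which A hits generically — or ZeroDivisionError for MOD = 0, and A
-- returns only on the accidental inputs whose every base happens to be invertible.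
def Pre_compute_sum_chunk (start : Int) (end_ : Int) (n : Int) (MOD : Int) : Prop :=
  end_ < start ∨ (1 ≤ MOD ∧ 0 ≤ n)
instance (start : Int) (end_ : Int) (n : Int) (MOD : Int) : Decidable (Pre_compute_sum_chunk start end_ n MOD) := by unfold Pre_compute_sum_chunk; infer_instance

def pvWitness_compute_sum_chunk : Int × Int × Int × Int := (1, 5, 3, 7)

def Spec_compute_sum_chunk (start : Int) (end_ : Int) (n : Int) (MOD : Int) (out : Int) : Prop := out = compute_sum_chunk_alt start end_ n MOD
instance (start : Int) (end_ : Int) (n : Int) (MOD : Int) (out : Int) : Decidable (Spec_compute_sum_chunk start end_ n MOD out) := by unfold Spec_compute_sum_chunk; infer_instance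

-- ===== CLAIM (what is proved, stated in full; the proofs are below) =====
def Claim_equal_compute_sum_chunk : Prop := ∀ (start : Int) (end_ : Int) (n : Int) (MOD : Int), Dom_compute_sum_chunk start end_ n MOD → Pre_compute_sum_chunk start end_ n MOD → Spec_compute_sum_chunk start end_ n MOD (compute_sum_chunk start end_ n MOD)

-- ===== LEMMAS AND PROOFS =====

-- A's per-term contribution (already reduced mod MOD).
def pvContrib (n MOD k : Int) : Int :=
  let r_mod := PySem.Int.mod (1 - k * k) MOD
  let den := PySem.Int.mod (k * k) MOD
  PySem.Int.mod
    (PySem.Int.mod (r_mod * PySem.Int.mod (1 - pvPowMod r_mod n.toNat MOD) MOD) MOD *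
      (if den ≠ 0 then pvPowMod den (MOD - 2).toNat MOD else 0)) MOD

-- reducing a factor mod m does not change a product mod m
theorem pvMulEmodLeft (x y m : Int) : x % m * y % m = x * y % m := by
  rw [Int.mul_emod, Int.emod_emod_of_dvd _ dvd_rfl, ← Int.mul_emod]

-- reducing the base mod m does not change a power mod m
theorem pvModEq_pow (m b : Int) (t : Nat) : (b % m) ^ t % m = b ^ t % m :=
  Int.ModEq.pow t (Int.emod_emod_of_dvd b dvd_rfl)

theorem pvPowMod_eq (m : Int) (hm : 0 < m) : ∀ (e : Nat) (b : Int), pvPowMod b e m = b ^ e % m := by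
  intro e
  induction e using Nat.strong_induction_on with
  | _ e ih =>
    intro b
    rw [pvPowMod]
    by_cases he : e = 0
    · simp [he, PySem.Int.mod_eq_emod_of_pos hm]
    · simp only [he, dite_false, PySem.Int.mod_eq_emod_of_pos hm]
      rw [ih (e / 2) (Nat.div_lt_self (by omega) one_lt_two)]
      have hbb : (b * b % m) ^ (e / 2) % m = b ^ (2 * (e / 2)) % m := by
        rw [pvModEq_pow, pow_mul, pow_two]
      by_cases ho : e % 2 = 1
      · simp only [ho, if_true]
        rw [Int.mul_emod, Int.emod_emod_of_dvd _ dvd_rfl, hbb,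
          ← Int.mul_emod, ← pow_succ]
        congr 2
        omega
      · simp only [ho, if_false]
        rw [hbb]
        congr 2
        omega

-- pvContrib is already reduced mod MOD
theorem pvContrib_emod (n MOD k : Int) (hM : 0 < MOD) :
    pvContrib n MOD k % MOD = pvContrib n MOD k := by
  simp only [pvContrib, PySem.Int.mod_eq_emod_of_pos hM]
  exact Int.emod_emod_of_dvd _ dvd_rfl

theorem pvFoldA (n MOD : Int) (hM : 0 < MOD) :
    ∀ (xs : List Int) (s : Int), 0 ≤ s → s < MOD →
    xs.foldl (fun s k =>
      let r := 1 - k * k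
      let r_mod := PySem.Int.mod r MOD
      let rn := pvPowMod r_mod n.toNat MOD
      let one_minus_rn := PySem.Int.mod (1 - rn) MOD
      let num := PySem.Int.mod (r_mod * one_minus_rn) MOD
      let den := PySem.Int.mod (k * k) MOD
      let den_inv := if den ≠ 0 then pvPowMod den (MOD - 2).toNat MOD else 0
      let contrib := PySem.Int.mod (num * den_inv) MOD
      PySem.Int.mod (s + contrib) MOD) s
      = (s + (xs.map (pvContrib n MOD)).sum) % MOD := by
  intro xs
  induction xs with
  | nil =>
      intro s h0 h1
      simpa using (Int.emod_eq_of_lt h0 h1).symm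
  | cons k rest ih =>
      intro s h0 h1
      rw [List.foldl_cons]
      refine (ih _ ?_ ?_).trans ?_
      · simp only [PySem.Int.mod_eq_emod_of_pos hM]
        exact Int.emod_nonneg _ (by omega)
      · simp only [PySem.Int.mod_eq_emod_of_pos hM]
        exact Int.emod_lt_of_pos _ hM
      · simp only [pvContrib, PySem.Int.mod_eq_emod_of_pos hM, List.map_cons, List.sum_cons]
        rw [Int.emod_add_emod]
        ring_nf

-- B's leaf equals A's per-term contribution: (k^(MOD-2))^2 ≡ (k^2 % MOD)^(MOD-2) (mod MOD)
theorem pvAltLeaf (n MOD k : Int) (hM : 0 < MOD) :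
    compute_sum_chunk_alt k k n MOD = pvContrib n MOD k := by
  rw [compute_sum_chunk_alt, dif_neg (lt_irrefl k), dif_pos rfl]
  simp only [pvContrib, ne_eq, ite_not]
  by_cases hd : PySem.Int.mod (k * k) MOD = 0
  · simp [hd, PySem.Int.mod_eq_emod_of_pos hM]
  · simp only [hd, if_false]
    simp only [PySem.Int.mod_eq_emod_of_pos hM, pvPowMod_eq MOD hM]
    have hinv : k ^ (MOD - 2).toNat % MOD * (k ^ (MOD - 2).toNat % MOD) % MOD
        = (k * k % MOD) ^ (MOD - 2).toNat % MOD := by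
      rw [← Int.mul_emod, ← pow_add, pvModEq_pow, mul_pow, ← pow_add]
    rw [Int.mul_emod, hinv, Int.emod_emod_of_dvd _ dvd_rfl, ← Int.mul_emod, pvMulEmodLeft]

-- B equals the mod-MOD sum of A's contributions over the chunk.
theorem pvAltSum (n MOD : Int) (hM : 0 < MOD) :
    ∀ (N : Nat) (start end_ : Int), (end_ - start).toNat ≤ N →
    compute_sum_chunk_alt start end_ n MOD
      = ((PySem.List.pyRange start (end_ + 1) 1).map (pvContrib n MOD)).sum % MOD := by
  intro N
  induction N with
  | zero =>
      intro start end_ hN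
      by_cases h1 : end_ < start
      · rw [compute_sum_chunk_alt, dif_pos h1,
          PySem.List.pyRange_one_eq_nil (show (end_:Int) + 1 ≤ start by omega)]
        simp
      · have h2 : start = end_ := by omega
        subst h2
        rw [pvAltLeaf n MOD start hM,
          PySem.List.pyRange_one_cons (show start < start + 1 by omega),
          PySem.List.pyRange_one_eq_nil (le_refl (start + 1))]
        simp [pvContrib_emod n MOD start hM]
  | succ N ih =>
      intro start end_ hN
      by_cases h1 : end_ < start
      · rw [compute_sum_chunk_alt, dif_pos h1,
          PySem.List.pyRange_one_eq_nil (show (end_:Int) + 1 ≤ start by omega)]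
        simp
      · by_cases h2 : start = end_
        · subst h2
          rw [pvAltLeaf n MOD start hM,
            PySem.List.pyRange_one_cons (show start < start + 1 by omega),
            PySem.List.pyRange_one_eq_nil (le_refl (start + 1))]
          simp [pvContrib_emod n MOD start hM]
        · have hlt : start < end_ := by omega
          have hb := PySem.Int.floordiv_two_mid_bounds (le_of_lt hlt)
          have hu : PySem.Int.floordiv (start + end_) 2 < end_ :=
            (PySem.Int.floordiv_lt_iff_lt_mul (by norm_num)).mpr (by omega)
          set mid := PySem.Int.floordiv (start + end_) 2 with hmiddef
          have hunf : compute_sum_chunk_alt start end_ n MOD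
              = PySem.Int.mod (compute_sum_chunk_alt start mid n MOD
                  + compute_sum_chunk_alt (mid + 1) end_ n MOD) MOD := by
            rw [compute_sum_chunk_alt, dif_neg h1, dif_neg h2]
          have hsplit : PySem.List.pyRange start (end_ + 1) 1
              = PySem.List.pyRange start (mid + 1) 1 ++ PySem.List.pyRange (mid + 1) (end_ + 1) 1 :=
            PySem.List.pyRange_one_append start (mid + 1) (end_ + 1) (by omega) (by omega)
          rw [hunf, ih start mid (by omega), ih (mid + 1) end_ (by omega), hsplit,
            List.map_append, List.sum_append, PySem.Int.mod_eq_emod_of_pos hM,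
            ← Int.add_emod]

-- ===== VERDICT (by name: the statement is the Claim_ definition above) =====
theorem compute_sum_chunk_spec : Claim_equal_compute_sum_chunk := by
  intro start end_ n MOD _hDom hPre
  unfold Spec_compute_sum_chunk
  by_cases hemp : end_ < start
  · rw [compute_sum_chunk_alt, dif_pos hemp]
    simp [compute_sum_chunk,
      PySem.List.pyRange_one_eq_nil (show (end_:Int) + 1 ≤ start by omega)]
  · rcases hPre with h | ⟨hM, _hn⟩
    · omega
    have hM0 : (0:Int) < MOD := by omega
    unfold compute_sum_chunk
    rw [pvFoldA n MOD hM0 _ 0 le_rfl hM0,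
      pvAltSum n MOD hM0 (end_ - start).toNat start end_ le_rfl]
    norm_num
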